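-- pv_equiv track=rewrite | github.com/SMD-Bioinformatics-Lund/nextflow_wgs | bin/create_gens_case_yaml.py | select_samples
-- ===== SOURCE A (Python) =====
-- TYPE_ORDER = {"proband": 0, "mother": 1, "father": 2}
--
-- def select_samples(samples: list[dict[str, str | None]], trio: bool) -> list[dict[str, str | None]]:
--     if trio:
--         by_type: dict[str, dict[str, str | None]] = {}
--         for sample in samples:
--             sample_type = sample["sample_type"]
--             if sample_type in TYPE_ORDER and sample_type not in by_type:
--                 by_type[sample_type] = sample
--         selected = [by_type[key] for key in ("proband", "mother", "father") if key in by_type]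
--         if selected:
--             return selected[:3]
--         return samples[:3]
--
--     for sample in samples:
--         if sample["sample_type"] == "proband":
--             return [sample]
--     return samples[:1]
-- ===== SOURCE B (Python) =====
-- def select_samples(samples, trio):
--     if trio:
--         selected = []
--         for key in ("proband", "mother", "father"):
--             for sample in samples:
--                 if sample["sample_type"] == key:
--                     selected.append(sample)
--                     break
--         if selected:
--             return selected[:3]
--         return samples[:3]
--
--     for sample in samples:
--         if sample["sample_type"] == "proband":
--             return [sample]
--     return samples[:1]
-- ===== Notes on version B (the rewrite author's own statement) =====
-- stated objective: simpler
-- what changed: Replaces the by_type dict build-then-lookup with three independent first-match scans of samples, one per fixed key in output order; no dict is built.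
import Mathlib
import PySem

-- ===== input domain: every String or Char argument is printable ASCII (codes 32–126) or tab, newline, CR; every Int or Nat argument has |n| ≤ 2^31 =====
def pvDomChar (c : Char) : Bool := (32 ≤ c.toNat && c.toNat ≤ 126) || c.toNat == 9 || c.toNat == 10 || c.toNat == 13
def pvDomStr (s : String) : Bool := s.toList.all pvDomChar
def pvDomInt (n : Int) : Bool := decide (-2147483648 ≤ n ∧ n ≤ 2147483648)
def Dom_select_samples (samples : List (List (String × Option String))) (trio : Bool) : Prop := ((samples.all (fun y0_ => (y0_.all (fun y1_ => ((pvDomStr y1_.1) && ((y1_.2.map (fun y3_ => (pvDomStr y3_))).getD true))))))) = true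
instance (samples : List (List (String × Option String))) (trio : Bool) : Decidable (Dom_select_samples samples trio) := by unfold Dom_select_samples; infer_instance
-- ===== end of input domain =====

-- B replaces the by_type dict build-then-lookup with three independent first-match scans
-- (one per key, in output order); return value only, neither version mutates its input.

-- sample["sample_type"]: first-match assoc lookup; missing key (Python KeyError) is excluded
-- by Pre_, so the .getD none default is never reached on admitted inputs
def pvSampleType (s : List (String × Option String)) : Option String :=
  (PySem.Dict.get? (PySem.Dict.mk s) "sample_type").getD none

-- ===== PORT A =====
def pvStepA (d : PySem.Dict String (List (String × Option String)))
    (s : List (String × Option String)) : PySem.Dict String (List (String × Option String)) :=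
  match pvSampleType s with
  | some t =>
      if (t = "proband" ∨ t = "mother" ∨ t = "father") ∧ PySem.Dict.get? d t = none then
        PySem.Dict.insert d t s
      else d
  | none => d

def pvFindProband : List (List (String × Option String)) → Option (List (String × Option String))
  | [] => none
  | s :: rest => if pvSampleType s = some "proband" then some s else pvFindProband rest

def select_samples (samples : List (List (String × Option String))) (trio : Bool) :
    List (List (String × Option String)) :=
  if trio then
    let by_type := samples.foldl pvStepA PySem.Dict.empty
    let selected := (["proband", "mother", "father"]).filterMap (fun k => PySem.Dict.get? by_type k)
    if selected ≠ [] then selected.take 3 else samples.take 3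
  else
    match pvFindProband samples with
    | some s => [s]
    | none => samples.take 1

-- ===== PORT B =====
-- inner 'for sample in samples: if …: append; break' = first sample whose type equals key
def pvScanFirst (samples : List (List (String × Option String))) (key : String) :
    Option (List (String × Option String)) :=
  match samples with
  | [] => none
  | s :: rest => if pvSampleType s = some key then some s else pvScanFirst rest key

def select_samples_alt (samples : List (List (String × Option String))) (trio : Bool) :
    List (List (String × Option String)) :=
  if trio then
    let selected := (["proband", "mother", "father"]).foldl
      (fun acc k =>
        match pvScanFirst samples k with
        | some s => acc ++ [s]
        | none => acc) []
    if selected ≠ [] then selected.take 3 else samples.take 3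
  else
    match pvScanFirst samples "proband" with
    | some s => [s]
    | none => samples.take 1

-- ===== PRECONDITION & SPEC =====
-- Pre_ is exactly where A returns: A raises KeyError on a sample lacking the "sample_type"
-- key when that sample is reached — all samples in the trio branch, and in the non-trio
-- branch only the samples scanned before the first proband.
def Pre_select_samples (samples : List (List (String × Option String))) (trio : Bool) : Prop :=
  (if trio then
      samples.all (fun s => (PySem.Dict.get? (PySem.Dict.mk s) "sample_type").isSome)
    else
      samples.all (fun s => (PySem.Dict.get? (PySem.Dict.mk s) "sample_type").isSome) ||
        (samples.takeWhile (fun s => (PySem.Dict.get? (PySem.Dict.mk s) "sample_type").isSome)).any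
          (fun s => PySem.Dict.get? (PySem.Dict.mk s) "sample_type" == some (some "proband"))) = true
instance (samples : List (List (String × Option String))) (trio : Bool) :
    Decidable (Pre_select_samples samples trio) := by unfold Pre_select_samples; infer_instance

def pvWitness_select_samples : (List (List (String × Option String))) × Bool :=
  ([[("sample_type", some "proband")], [("sample_type", some "mother")]], true)

def Spec_select_samples (samples : List (List (String × Option String))) (trio : Bool)
    (out : List (List (String × Option String))) : Prop := out = select_samples_alt samples trio
instance (samples : List (List (String × Option String))) (trio : Bool)
    (out : List (List (String × Option String))) : Decidable (Spec_select_samples samples trio out) := by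
  unfold Spec_select_samples; infer_instance

-- ===== CLAIM (what is proved, stated in full; the proofs are below) =====
def Claim_equal_select_samples : Prop := ∀ (samples : List (List (String × Option String))) (trio : Bool), Dom_select_samples samples trio → Pre_select_samples samples trio → Spec_select_samples samples trio (select_samples samples trio)

-- ===== LEMMAS AND PROOFS =====

-- the dict A builds answers each key with the first sample of that type
theorem get?_foldl_stepA (samples : List (List (String × Option String)))
    (d : PySem.Dict String (List (String × Option String))) (k : String)
    (hk : k = "proband" ∨ k = "mother" ∨ k = "father") :
    PySem.Dict.get? (samples.foldl pvStepA d) k =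
      (PySem.Dict.get? d k).orElse (fun _ => pvScanFirst samples k) := by
  induction samples generalizing d with
  | nil => cases h : PySem.Dict.get? d k <;> simp [pvScanFirst, h, Option.orElse]
  | cons s rest ih =>
    simp only [List.foldl_cons]
    rw [ih]
    cases ht : pvSampleType s with
    | none =>
      have h1 : pvStepA d s = d := by simp [pvStepA, ht]
      have h2 : pvScanFirst (s :: rest) k = pvScanFirst rest k := by simp [pvScanFirst, ht]
      rw [h1, h2]
    | some t =>
      by_cases hc : (t = "proband" ∨ t = "mother" ∨ t = "father") ∧ PySem.Dict.get? d t = none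
      · have h1 : pvStepA d s = PySem.Dict.insert d t s := by simp [pvStepA, ht, hc]
        rw [h1]
        by_cases hkt : k = t
        · subst hkt
          rw [PySem.Dict.get?_insert_self, hc.2]
          simp [pvScanFirst, ht, Option.orElse]
        · rw [PySem.Dict.get?_insert_of_ne _ _ hkt]
          have h2 : pvScanFirst (s :: rest) k = pvScanFirst rest k := by
            simp [pvScanFirst, ht]
            intro h; exact absurd h.symm hkt
          rw [h2]
      · have h1 : pvStepA d s = d := by simp [pvStepA, ht, hc]
        rw [h1]
        by_cases hkt : t = k
        · subst hkt
          cases h : PySem.Dict.get? d t with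
          | none => exact absurd ⟨hk, h⟩ hc
          | some v => simp [Option.orElse]
        · have h2 : pvScanFirst (s :: rest) k = pvScanFirst rest k := by
            simp [pvScanFirst, ht, hkt]
          rw [h2]

-- B's fold over the three keys collects the scan results in order
theorem foldl_scan_eq_filterMap (samples : List (List (String × Option String)))
    (keys : List String) (acc : List (List (String × Option String))) :
    keys.foldl
      (fun acc k =>
        match pvScanFirst samples k with
        | some s => acc ++ [s]
        | none => acc) acc = acc ++ keys.filterMap (fun k => pvScanFirst samples k) := by
  induction keys generalizing acc with
  | nil => simp
  | cons k rest ih =>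
    simp only [List.foldl_cons, List.filterMap_cons]
    cases h : pvScanFirst samples k <;> simp [ih]

theorem findProband_eq_scan (samples : List (List (String × Option String))) :
    pvFindProband samples = pvScanFirst samples "proband" := by
  induction samples with
  | nil => rfl
  | cons s rest ih => simp [pvFindProband, pvScanFirst, ih]

-- ===== VERDICT (by name: the statement is the Claim_ definition above) =====
theorem select_samples_spec : Claim_equal_select_samples := by
  intro samples trio _ _
  unfold Spec_select_samples select_samples select_samples_alt
  cases trio with
  | false => simp [findProband_eq_scan]
  | true =>
    simp only [if_pos]
    rw [foldl_scan_eq_filterMap, List.nil_append]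
    have hsel : (["proband", "mother", "father"]).filterMap
        (fun k => PySem.Dict.get? (samples.foldl pvStepA PySem.Dict.empty) k) =
        (["proband", "mother", "father"]).filterMap (fun k => pvScanFirst samples k) := by
      apply List.filterMap_congr
      intro k hk
      rw [get?_foldl_stepA samples PySem.Dict.empty k (by simpa using hk)]
      simp [PySem.Dict.get?_empty, Option.orElse]
    rw [hsel]
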